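-- pv_equiv track=rewrite | github.com/eunchae-jeon/algorithm | Programmers/line2.py | solution
-- ===== SOURCE A (Python) =====
-- def solution(answer_sheet, sheets):
--     answer = -1
--
--     for i in range(len(sheets)):
--         for j in range(i+1, len(sheets)):
--             num = 0
--             leng = 0
--             longest = 0
--             prev = False
--             for k in range(len(answer_sheet)):
--                 if sheets[i][k] == sheets[j][k] and sheets[i][k] != answer_sheet[k]:
--                     num += 1
--                     if prev == True:
--                         leng += 1
--                     else:
--                         leng = 1
--                     prev = True
--                 else:
--                     prev = False
--                     if leng > longest:
--                         longest = leng
--                     leng = 0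
--             if leng > longest:
--                 longest = leng
--             p =  num + longest**2
--             if p > answer:
--                 answer = p
--
--     return answer
-- ===== SOURCE B (Python) =====
-- def _runs(mask):
--     # lengths of the maximal runs of True in mask, computed by recursive splitting
--     if not mask:
--         return []
--     if not mask[0]:
--         return _runs(mask[1:])
--     n = 1
--     while n < len(mask) and mask[n]:
--         n += 1
--     return [n] + _runs(mask[n:])
--
--
-- def solution(answer_sheet, sheets):
--     best = -1
--     for i in range(len(sheets)):
--         for j in range(i + 1, len(sheets)):
--             mask = [x == y and x != a for x, y, a in
--                     zip(sheets[i], sheets[j], answer_sheet)]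
--             rs = _runs(mask)
--             longest = max(rs, default=0)
--             best = max(best, sum(rs) + longest ** 2)
--     return best
-- ===== Notes on version B (the rewrite author's own statement) =====
-- stated objective: simpler
-- what changed: Per pair, A's four-variable streaming state machine (num/leng/longest/prev with a trailing flush) is replaced by building the boolean mismatch mask via zip and decomposing it into its True-run lengths by recursive splitting, so the score is just sum(runs) + max(runs, default=0)**2.
-- outside the precondition, e.g. on solution([1, 2], [[1], [1]]): A raises IndexError, B returns 0
import Mathlib
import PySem

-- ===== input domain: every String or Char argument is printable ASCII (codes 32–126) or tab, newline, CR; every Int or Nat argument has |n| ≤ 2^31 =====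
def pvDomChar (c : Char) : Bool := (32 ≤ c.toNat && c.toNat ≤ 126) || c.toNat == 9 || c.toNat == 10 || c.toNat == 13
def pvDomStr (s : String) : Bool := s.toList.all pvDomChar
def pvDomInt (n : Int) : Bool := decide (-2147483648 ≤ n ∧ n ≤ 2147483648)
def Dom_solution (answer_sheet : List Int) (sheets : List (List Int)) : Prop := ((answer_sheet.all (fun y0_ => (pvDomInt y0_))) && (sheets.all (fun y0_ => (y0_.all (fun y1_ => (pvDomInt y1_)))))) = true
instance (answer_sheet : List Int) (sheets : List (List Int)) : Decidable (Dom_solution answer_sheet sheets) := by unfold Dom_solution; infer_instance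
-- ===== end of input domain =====

-- B replaces A's four-variable streaming state machine (num/leng/longest/prev with a trailing
-- flush) by a boolean mismatch mask decomposed into its True-run lengths by recursive
-- splitting; the score is then sum(runs) + max(runs, default=0)**2.  Objective: simpler.

-- ===== PORT A =====
def solution (answer_sheet : List Int) (sheets : List (List Int)) : Int :=
  (PySem.List.pyRange 0 sheets.length 1).foldl (fun answer i =>
    (PySem.List.pyRange (i + 1) sheets.length 1).foldl (fun answer j =>
      let st := (PySem.List.pyRange 0 answer_sheet.length 1).foldl
        (fun (s : Int × Int × Int × Bool) k =>
          if PySem.List.pyGetD (PySem.List.pyGetD sheets i []) k 0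
               = PySem.List.pyGetD (PySem.List.pyGetD sheets j []) k 0
             ∧ PySem.List.pyGetD (PySem.List.pyGetD sheets i []) k 0
               ≠ PySem.List.pyGetD answer_sheet k 0
          then (s.1 + 1, if s.2.2.2 = true then s.2.1 + 1 else 1, s.2.2.1, true)
          else (s.1, 0, if s.2.1 > s.2.2.1 then s.2.1 else s.2.2.1, false))
        (0, 0, 0, false)
      let longest := if st.2.1 > st.2.2.1 then st.2.1 else st.2.2.1
      let p := st.1 + longest ^ 2
      if p > answer then p else answer) answer) (-1)

-- ===== PORT B =====
-- lengths of the maximal runs of `true`, by recursive splitting (Source B's _runs)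
def runsB : List Bool → List Int
  | [] => []
  | false :: t => runsB t
  | true :: t =>
      ((t.takeWhile (fun b => b)).length + 1 : Int) :: runsB (t.dropWhile (fun b => b))
termination_by m => m.length
decreasing_by all_goals (simp only [List.length_cons, Nat.lt_succ_iff]; first | exact le_rfl | exact List.length_dropWhile_le _ _)

def solution_alt (answer_sheet : List Int) (sheets : List (List Int)) : Int :=
  (PySem.List.pyRange 0 sheets.length 1).foldl (fun best i =>
    (PySem.List.pyRange (i + 1) sheets.length 1).foldl (fun best j =>
      let mask := List.zipWith (fun (xy : Int × Int) a => xy.1 == xy.2 && xy.1 != a)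
        ((PySem.List.pyGetD sheets i []).zip (PySem.List.pyGetD sheets j [])) answer_sheet
      let rs := runsB mask
      let longest := rs.foldl max 0
      max best (rs.sum + longest ^ 2)) best) (-1)

-- ===== PRECONDITION & SPEC =====
-- Pre_ excludes inputs where some sheet row is shorter than answer_sheet while there are at
-- least two sheets: there A raises IndexError (its k-loop indexes every row up to
-- len(answer_sheet)).
def Pre_solution (answer_sheet : List Int) (sheets : List (List Int)) : Prop :=
  sheets.length < 2 ∨ ∀ s ∈ sheets, answer_sheet.length ≤ s.length
instance (answer_sheet : List Int) (sheets : List (List Int)) : Decidable (Pre_solution answer_sheet sheets) := by unfold Pre_solution; infer_instance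

def pvWitness_solution : List Int × List (List Int) := ([1, 2], [[1, 1], [1, 1], [2, 2]])

def Spec_solution (answer_sheet : List Int) (sheets : List (List Int)) (out : Int) : Prop := out = solution_alt answer_sheet sheets
instance (answer_sheet : List Int) (sheets : List (List Int)) (out : Int) : Decidable (Spec_solution answer_sheet sheets out) := by unfold Spec_solution; infer_instance

-- ===== CLAIM (what is proved, stated in full; the proofs are below) =====
def Claim_equal_solution : Prop := ∀ (answer_sheet : List Int) (sheets : List (List Int)), Dom_solution answer_sheet sheets → Pre_solution answer_sheet sheets → Spec_solution answer_sheet sheets (solution answer_sheet sheets)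

-- ===== LEMMAS AND PROOFS =====

-- A's inner-loop transition as a function of the mask bit
def stA (s : Int × Int × Int × Bool) (b : Bool) : Int × Int × Int × Bool :=
  if b then (s.1 + 1, if s.2.2.2 = true then s.2.1 + 1 else 1, s.2.2.1, true)
  else (s.1, 0, if s.2.1 > s.2.2.1 then s.2.1 else s.2.2.1, false)

-- running-maximum of the current run, with carry
def maxCarry : Int → List Bool → Int
  | c, [] => c
  | c, true :: t => maxCarry (c + 1) t
  | c, false :: t => max c (maxCarry 0 t)

theorem if_gt_eq_max (a b : Int) : (if a > b then a else b) = max b a := by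
  split_ifs <;> omega

theorem stA_fst (m : List Bool) : ∀ s : Int × Int × Int × Bool,
    (m.foldl stA s).1 = s.1 + (m.count true : Int) := by
  induction m with
  | nil => intro s; simp
  | cons b t ih =>
      intro s
      cases b <;> simp [List.foldl_cons, stA, ih, List.count_cons] <;> omega

theorem stA_longest (m : List Bool) : ∀ num leng longest : Int, ∀ prev : Bool,
    (prev = false → leng = 0) →
    (max (m.foldl stA (num, leng, longest, prev)).2.1
         (m.foldl stA (num, leng, longest, prev)).2.2.1)
      = max longest (maxCarry leng m) := by
  induction m with
  | nil => intro num leng longest prev _; simp [maxCarry, max_comm]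
  | cons b t ih =>
      intro num leng longest prev hinv
      cases b with
      | true =>
          have hleng : (if prev = true then leng + 1 else 1) = leng + 1 := by
            cases prev with
            | false => simp [hinv rfl]
            | true => simp
          simp only [List.foldl_cons, stA, hleng, maxCarry, if_true, eq_self_iff_true]
          exact ih (num + 1) (leng + 1) longest true (by simp)
      | false =>
          simp only [List.foldl_cons, stA, Bool.false_eq_true, if_false, maxCarry]
          rw [ih num 0 (if leng > longest then leng else longest) false (fun _ => rfl),
              if_gt_eq_max]
          rcases le_total leng (maxCarry 0 t) with h | h <;> rcases le_total leng longest with h2 | h2 <;>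
            simp [max_def] <;> omega

theorem maxCarry_nonneg (m : List Bool) : ∀ c : Int, 0 ≤ c → 0 ≤ maxCarry c m := by
  induction m with
  | nil => intro c hc; exact hc
  | cons b t ih =>
      intro c hc
      cases b with
      | true => exact ih (c + 1) (by omega)
      | false => exact le_trans hc (le_max_left c (maxCarry 0 t))

theorem maxCarry_split (m : List Bool) : ∀ c : Int, 0 ≤ c →
    maxCarry c m = max (c + ((m.takeWhile (fun b => b)).length : Int))
                       (maxCarry 0 (m.dropWhile (fun b => b))) := by
  induction m with
  | nil => intro c hc; simp [maxCarry]; omega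
  | cons b t ih =>
      intro c hc
      cases b with
      | true =>
          have h := ih (c + 1) (by omega)
          simp only [maxCarry, List.takeWhile_cons, List.dropWhile_cons]
          norm_num
          rw [h]
          congr 1
          push_cast
          omega
      | false =>
          have h0 : 0 ≤ maxCarry 0 t := maxCarry_nonneg t 0 le_rfl
          simp only [maxCarry, List.takeWhile_cons, List.dropWhile_cons]
          norm_num
          simp only [maxCarry]
          rw [max_eq_right h0]

theorem foldl_max_init (l : List Int) : ∀ a b : Int,
    l.foldl max (max a b) = max a (l.foldl max b) := by
  induction l with
  | nil => intro a b; simp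
  | cons x t ih =>
      intro a b
      simp only [List.foldl_cons, max_assoc, ih]

theorem maxCarry_runsB (m : List Bool) : maxCarry 0 m = (runsB m).foldl max 0 := by
  induction m using runsB.induct with
  | case1 => simp [maxCarry, runsB]
  | case2 t ih =>
      have h0 : 0 ≤ maxCarry 0 t := maxCarry_nonneg t 0 le_rfl
      simp only [maxCarry, runsB, ih]
      exact max_eq_right (ih ▸ h0)
  | case3 t ih =>
      have h1 : maxCarry (0 + 1) t
          = max ((0 + 1) + ((t.takeWhile (fun b => b)).length : Int))
                (maxCarry 0 (t.dropWhile (fun b => b))) := maxCarry_split t 1 (by omega)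
      simp only [maxCarry, runsB, List.foldl_cons, h1, ih]
      have h2 : max (0 : Int) (((t.takeWhile (fun b => b)).length : Int) + 1)
          = ((t.takeWhile (fun b => b)).length : Int) + 1 := by
        rw [max_eq_right]; positivity
      rw [h2]
      have h3 : (((t.takeWhile (fun b => b)).length : Int) + 1)
          = max (((t.takeWhile (fun b => b)).length + 1 : Int)) 0 := by
        rw [max_eq_left]; positivity
      rw [h3, foldl_max_init]
      congr 1
      omega

theorem runsB_sum (m : List Bool) : (runsB m).sum = (m.count true : Int) := by
  induction m using runsB.induct with
  | case1 => simp [runsB]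
  | case2 t ih => simp [runsB, ih, List.count_cons]
  | case3 t ih =>
      have hsplit : t.count true
          = (t.takeWhile (fun b => b)).count true + (t.dropWhile (fun b => b)).count true := by
        conv_lhs => rw [← List.takeWhile_append_dropWhile (p := fun b => b) (l := t)]
        rw [List.count_append]
      have hall : (t.takeWhile (fun b => b)).count true = (t.takeWhile (fun b => b)).length := by
        rw [List.count_eq_length]
        intro b hb
        have := List.mem_takeWhile_imp hb
        simp at this
        simp [this]
      simp only [runsB, List.sum_cons, ih, hsplit, hall, List.count_cons]
      norm_num
      push_cast
      omega

-- the per-pair score computed by A's state machine equals B's runs-based score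
theorem score_eq (m : List Bool) :
    (m.foldl stA (0, 0, 0, false)).1
      + (if (m.foldl stA (0, 0, 0, false)).2.1 > (m.foldl stA (0, 0, 0, false)).2.2.1
         then (m.foldl stA (0, 0, 0, false)).2.1 else (m.foldl stA (0, 0, 0, false)).2.2.1) ^ 2
      = (runsB m).sum + ((runsB m).foldl max 0) ^ 2 := by
  rw [if_gt_eq_max, stA_fst]
  rw [max_comm ((List.foldl stA (0, 0, 0, false) m).2.2.1) ((List.foldl stA (0, 0, 0, false) m).2.1)]
  rw [stA_longest m 0 0 0 false (fun _ => rfl)]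
  rw [runsB_sum, ← maxCarry_runsB, max_eq_right (maxCarry_nonneg m 0 le_rfl)]
  norm_num

-- the per-pair computation: A's indexed loop equals B's mask expression, given long enough rows
theorem pair_eq (answer_sheet si sj : List Int)
    (hi : answer_sheet.length ≤ si.length) (hj : answer_sheet.length ≤ sj.length) :
    (let st := (PySem.List.pyRange 0 answer_sheet.length 1).foldl
        (fun (s : Int × Int × Int × Bool) k =>
          if PySem.List.pyGetD si k 0 = PySem.List.pyGetD sj k 0
             ∧ PySem.List.pyGetD si k 0 ≠ PySem.List.pyGetD answer_sheet k 0
          then (s.1 + 1, if s.2.2.2 = true then s.2.1 + 1 else 1, s.2.2.1, true)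
          else (s.1, 0, if s.2.1 > s.2.2.1 then s.2.1 else s.2.2.1, false))
        (0, 0, 0, false)
     st.1 + (if st.2.1 > st.2.2.1 then st.2.1 else st.2.2.1) ^ 2)
    = (let mask := List.zipWith (fun (xy : Int × Int) a => xy.1 == xy.2 && xy.1 != a)
          (si.zip sj) answer_sheet
       (runsB mask).sum + ((runsB mask).foldl max 0) ^ 2) := by
  set mask := List.zipWith (fun (xy : Int × Int) a => xy.1 == xy.2 && xy.1 != a)
      (si.zip sj) answer_sheet with hm
  have hlen : mask.length = answer_sheet.length := by
    simp [hm, List.length_zip]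
    omega
  have hbody : (PySem.List.pyRange 0 answer_sheet.length 1).foldl
      (fun (s : Int × Int × Int × Bool) k =>
        if PySem.List.pyGetD si k 0 = PySem.List.pyGetD sj k 0
           ∧ PySem.List.pyGetD si k 0 ≠ PySem.List.pyGetD answer_sheet k 0
        then (s.1 + 1, if s.2.2.2 = true then s.2.1 + 1 else 1, s.2.2.1, true)
        else (s.1, 0, if s.2.1 > s.2.2.1 then s.2.1 else s.2.2.1, false))
      (0, 0, 0, false)
      = mask.foldl stA (0, 0, 0, false) := by
    rw [← hlen]
    rw [← PySem.List.foldl_pyRange_zero_pyGetD' mask false stA (0, 0, 0, false)]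
    apply PySem.List.foldl_congr_mem
    intro acc k hk
    have hk' := (PySem.List.mem_pyRange_one.mp hk)
    have hk1 : 0 ≤ k := hk'.1
    have hk2 : k < mask.length := by exact_mod_cast hk'.2
    have hkn : k.toNat < answer_sheet.length := by omega
    have hksi : k.toNat < si.length := by omega
    have hksj : k.toNat < sj.length := by omega
    have hkm : k.toNat < mask.length := by omega
    rw [PySem.List.pyGetD_eq_getElem si 0 hk1 (by omega),
        PySem.List.pyGetD_eq_getElem sj 0 hk1 (by omega),
        PySem.List.pyGetD_eq_getElem answer_sheet 0 hk1 (by omega),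
        PySem.List.pyGetD_eq_getElem mask false hk1 (by omega)]
    have hmk : mask[k.toNat] = (si[k.toNat] == sj[k.toNat] && si[k.toNat] != answer_sheet[k.toNat]) := by
      simp [hm, List.getElem_zipWith, List.getElem_zip]
    rw [hmk]
    by_cases hc : si[k.toNat] = sj[k.toNat] ∧ si[k.toNat] ≠ answer_sheet[k.toNat]
    · simp [stA, hc.1, hc.2, if_pos hc]
    · have hfalse : (si[k.toNat] == sj[k.toNat] && si[k.toNat] != answer_sheet[k.toNat]) = false := by
        rcases not_and_or.mp hc with h | h
        · simp [h]
        · rw [not_not] at h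
          simp [h]
      simp [stA, hfalse, if_neg hc]
  simp only [hbody]
  exact score_eq mask

-- ===== VERDICT (by name: the statement is the Claim_ definition above) =====
theorem solution_spec : Claim_equal_solution := by
  intro answer_sheet sheets _ hpre
  unfold Spec_solution solution solution_alt
  apply PySem.List.foldl_congr_mem
  intro acc i hi
  apply PySem.List.foldl_congr_mem
  intro acc' j hj
  obtain ⟨hi1, hi2⟩ := PySem.List.mem_pyRange_one.mp hi
  obtain ⟨hj1, hj2⟩ := PySem.List.mem_pyRange_one.mp hj
  have hlen2 : 2 ≤ sheets.length := by omega
  have hrows : ∀ s ∈ sheets, answer_sheet.length ≤ s.length := by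
    rcases hpre with h | h
    · omega
    · exact h
  have hii : i.toNat < sheets.length := by omega
  have hjj : j.toNat < sheets.length := by omega
  have hsi : PySem.List.pyGetD sheets i [] = sheets[i.toNat] :=
    PySem.List.pyGetD_eq_getElem sheets [] (by omega) (by omega)
  have hsj : PySem.List.pyGetD sheets j [] = sheets[j.toNat] :=
    PySem.List.pyGetD_eq_getElem sheets [] (by omega) (by omega)
  have h1 : answer_sheet.length ≤ (PySem.List.pyGetD sheets i []).length := by
    rw [hsi]; exact hrows _ (List.getElem_mem hii)
  have h2 : answer_sheet.length ≤ (PySem.List.pyGetD sheets j []).length := by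
    rw [hsj]; exact hrows _ (List.getElem_mem hjj)
  have := pair_eq answer_sheet (PySem.List.pyGetD sheets i []) (PySem.List.pyGetD sheets j []) h1 h2
  simp only at this ⊢
  rw [this, if_gt_eq_max]
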